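-- pv_equiv track=rewrite | github.com/grokit/dcore | shell_ext/port_scanner.py | str_gen
-- ===== SOURCE A (Python) =====
-- REPL = '{}'
--
-- def str_gen(base, gens):
--     if len(gens) == 0:
--         return base
--
--     found = False
--
--     rv = []
--     gen = gens.pop()
--     for bstr in base:
--         if REPL in bstr:
--             found = True
--             i = bstr.find(REPL)
--             j = i + len(REPL)
--             for gg in gen:
--                 rv.append(bstr[0:i] + str(gg) + bstr[j:])
--         else:
--             rv.append(bstr)
--
--     if found:
--         return str_gen(rv, gens)
--
--     return rv
-- ===== SOURCE B (Python) =====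
-- REPL = '{}'
--
-- def str_gen(base, gens):
--     # Iterative rewrite: walk the generators back-to-front (A pops from the
--     # end); note A mutates gens via pop() while B leaves it intact -- the
--     # equivalence is about the return value.
--     cur = base
--     for gen in reversed(gens):
--         nxt = []
--         found = False
--         for s in cur:
--             i = s.find(REPL)
--             if i < 0:
--                 nxt.append(s)
--             else:
--                 found = True
--                 nxt.extend(s[:i] + str(g) + s[i + 2:] for g in gen)
--         if not found:
--             return nxt
--         cur = nxt
--     return cur
-- ===== Notes on version B (the rewrite author's own statement) =====
-- stated objective: simpler
-- what changed: Replaces A's tail recursion with destructive gens.pop() by a plain loop over reversed(gens) with an early return, and the per-string 'in'+find pair by a single find with a sign test feeding a list.extend over a comprehension.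
import Mathlib
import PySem

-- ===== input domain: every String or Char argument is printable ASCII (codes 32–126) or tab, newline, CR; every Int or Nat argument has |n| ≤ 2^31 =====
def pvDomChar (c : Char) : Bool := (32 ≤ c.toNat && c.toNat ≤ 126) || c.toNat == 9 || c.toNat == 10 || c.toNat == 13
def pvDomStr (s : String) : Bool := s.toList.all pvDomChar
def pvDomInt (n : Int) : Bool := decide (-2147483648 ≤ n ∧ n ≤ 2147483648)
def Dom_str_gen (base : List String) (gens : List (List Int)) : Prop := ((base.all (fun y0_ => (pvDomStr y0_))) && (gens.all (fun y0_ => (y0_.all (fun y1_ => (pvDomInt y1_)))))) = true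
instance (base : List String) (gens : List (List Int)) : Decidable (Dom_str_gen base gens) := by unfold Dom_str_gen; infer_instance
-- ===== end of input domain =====

-- B replaces A's pop()-driven tail recursion by an explicit loop over the reversed
-- generator list with an early return (objective: simpler). A mutates gens via pop();
-- B does not — the equivalence proved here is about the return value only.

def REPL : String := "{}"

-- ===== PORT A =====
-- one level of A: the for-loop over base building (rv, found)
def strGenPassA (gen : List Int) (base : List String) : List String × Bool :=
  base.foldl
    (fun acc bstr =>
      if PySem.Str.isIn REPL bstr then
        let i := PySem.Str.find bstr REPL
        let j := i + PySem.Str.len REPL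
        (gen.foldl
          (fun rv gg =>
            rv ++ [PySem.Str.slice bstr (some 0) (some i) ++ PySem.Int.toStr gg
                     ++ PySem.Str.slice bstr (some j) none])
          acc.1, true)
      else (acc.1 ++ [bstr], acc.2))
    ([], false)

def str_gen (base : List String) (gens : List (List Int)) : List String :=
  if gens.length = 0 then base
  else
    let gen := gens.getLastD []        -- gens.pop(): last element, recurse on dropLast
    let p := strGenPassA gen base
    if p.2 then str_gen p.1 gens.dropLast else p.1
termination_by gens.length
decreasing_by rename_i hne; rw [List.length_dropLast]; omega

-- ===== PORT B =====
-- one iteration of B's while-style loop body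
def strGenStep (gen : List Int) (cur : List String) : List String × Bool :=
  cur.foldl
    (fun acc s =>
      let i := PySem.Str.find s REPL
      if i < 0 then (acc.1 ++ [s], acc.2)
      else (acc.1 ++ gen.map
              (fun g => PySem.Str.slice s (some 0) (some i) ++ PySem.Int.toStr g
                          ++ PySem.Str.slice s (some (i + 2)) none), true))
    ([], false)

def strGenLoop (cur : List String) (rs : List (List Int)) : List String :=
  match rs with
  | [] => cur
  | gen :: rest =>
    let p := strGenStep gen cur
    if p.2 then strGenLoop p.1 rest else p.1

def str_gen_alt (base : List String) (gens : List (List Int)) : List String :=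
  strGenLoop base gens.reverse

-- ===== PRECONDITION & SPEC =====
def Spec_str_gen (base : List String) (gens : List (List Int)) (out : List String) : Prop := out = str_gen_alt base gens
instance (base : List String) (gens : List (List Int)) (out : List String) : Decidable (Spec_str_gen base gens out) := by unfold Spec_str_gen; infer_instance

-- ===== CLAIM (what is proved, stated in full; the proofs are below) =====
def Claim_equal_str_gen : Prop := ∀ (base : List String) (gens : List (List Int)), Dom_str_gen base gens → Spec_str_gen base gens (str_gen base gens)

-- ===== LEMMAS AND PROOFS =====

-- the two per-level passes agree: '"{}" in s' is 'find s "{}" ≥ 0', the inner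
-- append-loop is a map, and len("{}") = 2
theorem strGenPassA_eq_step (gen : List Int) (cur : List String) :
    strGenPassA gen cur = strGenStep gen cur := by
  unfold strGenPassA strGenStep
  congr 1
  funext acc s
  simp only [PySem.Str.isIn_eq, PySem.Str.find_eq]
  by_cases hf : PySem.Chars.find s.toList REPL.toList < 0
  · have h : PySem.Chars.isIn REPL.toList s.toList = false := by
      rw [PySem.Chars.isIn_eq_false_iff]
      intro hinf
      exact absurd ((PySem.Chars.find_nonneg_iff _ _).mpr hinf) (not_le.mpr hf)
    simp [h, hf]
  · have h : PySem.Chars.isIn REPL.toList s.toList = true := by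
      rw [PySem.Chars.isIn_iff_infix]
      exact (PySem.Chars.find_nonneg_iff _ _).mp (not_lt.mp hf)
    have hlen : (PySem.Str.len REPL) = 2 := rfl
    rw [h, if_neg hf, if_pos rfl, hlen, PySem.List.foldl_append_singleton_eq_map]

theorem str_gen_eq_loop (gens : List (List Int)) :
    ∀ base, str_gen base gens = strGenLoop base gens.reverse := by
  induction gens using List.reverseRecOn with
  | nil =>
    intro base
    rw [str_gen.eq_def]
    simp [strGenLoop]
  | append_singleton xs x ih =>
    intro base
    rw [str_gen.eq_def]
    simp only [List.getLastD_concat, List.dropLast_concat, List.reverse_append,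
      List.reverse_cons, List.reverse_nil, List.nil_append, List.cons_append,
      strGenPassA_eq_step]
    have hne : ¬ (xs ++ [x]).length = 0 := by simp
    rw [if_neg hne]
    show (if (strGenStep x base).2 then str_gen (strGenStep x base).1 xs
          else (strGenStep x base).1) = strGenLoop base (x :: xs.reverse)
    rw [show strGenLoop base (x :: xs.reverse)
          = (if (strGenStep x base).2 then strGenLoop (strGenStep x base).1 xs.reverse
             else (strGenStep x base).1) from rfl]
    by_cases hp : (strGenStep x base).2
    · rw [if_pos hp, if_pos hp, ih]
    · rw [if_neg hp, if_neg hp]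

-- ===== VERDICT (by name: the statement is the Claim_ definition above) =====
theorem str_gen_spec : Claim_equal_str_gen := by
  intro base gens _
  unfold Spec_str_gen str_gen_alt
  exact str_gen_eq_loop gens base
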